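-- pv_equiv track=rewrite | github.com/chiara1998-ok/UTN-TUPaD-Programacion1 | Trabajo integrador.py/operaciones.py | contar_paises_por_continente
-- ===== SOURCE A (Python) =====
-- def contar_paises_por_continente(paises):
--     conteo = {}
--
--     for pais in paises:
--         continente = pais["continente"]
--         if continente in conteo:
--             conteo[continente] += 1
--         else:
--             conteo[continente] = 1
--
--     return conteo
-- ===== SOURCE B (Python) =====
-- def contar_paises_por_continente(paises):
--     # two-pass: collect continents, dedup in first-appearance order, then count each
--     conts = [pais["continente"] for pais in paises]
--     seen = []
--     for c in conts:
--         if c not in seen: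
--             seen.append(c)
--     return {c: conts.count(c) for c in seen}
-- ===== Notes on version B (the rewrite author's own statement) =====
-- stated objective: alternative
-- what changed: Replaces A's one-pass dict accumulation (check membership, increment or initialise) by a two-pass decomposition: extract the continent list, dedup it in first-appearance order, then build the result by counting each distinct continent in one comprehension.
import Mathlib
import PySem

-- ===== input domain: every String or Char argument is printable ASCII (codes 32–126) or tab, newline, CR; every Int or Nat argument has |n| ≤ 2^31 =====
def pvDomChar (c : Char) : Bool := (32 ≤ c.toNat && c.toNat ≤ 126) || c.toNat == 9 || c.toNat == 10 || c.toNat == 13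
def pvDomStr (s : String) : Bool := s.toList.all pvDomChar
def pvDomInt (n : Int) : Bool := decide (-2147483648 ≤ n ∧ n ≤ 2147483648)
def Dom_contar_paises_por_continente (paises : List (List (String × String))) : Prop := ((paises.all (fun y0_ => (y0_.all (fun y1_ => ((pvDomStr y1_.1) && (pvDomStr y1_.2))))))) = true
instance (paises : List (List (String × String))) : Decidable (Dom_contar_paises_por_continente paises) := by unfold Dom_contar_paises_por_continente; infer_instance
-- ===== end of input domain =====

-- B is an alternative decomposition (extract keys, dedup, count each) of A's one-pass dict counting; not faster.

-- ===== PORT A =====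
-- pais["continente"] : dict lookup = first match; total via getD "" — Pre_ guarantees the key is present.
def contar_paises_por_continente (paises : List (List (String × String))) : List (String × Int) :=
  (paises.foldl (fun conteo pais =>
      let continente := (pais.lookup "continente").getD ""
      if conteo.contains continente then
        conteo.modify continente 0 (· + 1)
      else
        conteo.insert continente 1)
    PySem.Dict.empty).items

-- ===== PORT B =====
def contar_paises_por_continente_alt (paises : List (List (String × String))) : List (String × Int) :=
  let conts := paises.map (fun pais => (pais.lookup "continente").getD "")
  let seen := conts.foldl (fun s c => PySem.Set.add s c) PySem.Set.empty
  seen.map (fun c => (c, (conts.count c : Int)))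

-- ===== PRECONDITION & SPEC =====
-- Pre_ excludes exactly the inputs where some pais lacks the "continente" key: there both A and B raise KeyError.
def Pre_contar_paises_por_continente (paises : List (List (String × String))) : Prop :=
  ∀ pais ∈ paises, (pais.lookup "continente").isSome
instance (paises : List (List (String × String))) : Decidable (Pre_contar_paises_por_continente paises) := by unfold Pre_contar_paises_por_continente; infer_instance

def pvWitness_contar_paises_por_continente : (List (List (String × String))) :=
  [[("nombre", "Peru"), ("continente", "America")], [("continente", "Asia")]]

def Spec_contar_paises_por_continente (paises : List (List (String × String))) (out : List (String × Int)) : Prop := out = contar_paises_por_continente_alt paises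
instance (paises : List (List (String × String))) (out : List (String × Int)) : Decidable (Spec_contar_paises_por_continente paises out) := by unfold Spec_contar_paises_por_continente; infer_instance

-- ===== CLAIM (what is proved, stated in full; the proofs are below) =====
def Claim_equal_contar_paises_por_continente : Prop := ∀ (paises : List (List (String × String))), Dom_contar_paises_por_continente paises → Pre_contar_paises_por_continente paises → Spec_contar_paises_por_continente paises (contar_paises_por_continente paises)

-- ===== LEMMAS AND PROOFS =====

-- A's branch (increment if present, else insert 1) is exactly Counter's modify step.
theorem pv_step_eq_modify (d : PySem.Dict String Int) (c : String) :
    (if d.contains c then d.modify c 0 (· + 1) else d.insert c 1)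
      = d.modify c 0 (· + 1) := by
  by_cases h : d.contains c
  · simp [h]
  · have h2 : d.get? c = none := by
      rw [PySem.Dict.get?_eq_none_iff_contains]; simp [h]
    simp [h, PySem.Dict.insert, PySem.Dict.modify, PySem.Dict.getD, h2]

theorem pv_fold_eq_counter (paises : List (List (String × String))) :
    paises.foldl (fun conteo pais =>
        let continente := (pais.lookup "continente").getD ""
        if conteo.contains continente then conteo.modify continente 0 (· + 1)
        else conteo.insert continente 1)
      PySem.Dict.empty
      = PySem.Dict.counter (paises.map (fun pais => (pais.lookup "continente").getD "")) := by
  rw [PySem.Dict.counter_eq_foldl, List.foldl_map]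
  apply PySem.List.foldl_congr_mem
  intro acc x _
  exact pv_step_eq_modify acc ((x.lookup "continente").getD "")

-- ===== VERDICT (by name: the statement is the Claim_ definition above) =====
theorem contar_paises_por_continente_spec : Claim_equal_contar_paises_por_continente := by
  intro paises _ _
  show contar_paises_por_continente paises = contar_paises_por_continente_alt paises
  unfold contar_paises_por_continente contar_paises_por_continente_alt
  rw [pv_fold_eq_counter, PySem.Dict.items_counter]
  simp [PySem.Set.ofList_eq_foldl]
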